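-- pv_equiv track=rewrite | github.com/BhanuHarshaY/AutoMend | model_2_training/src/data/dataset_contract.py | summarize_violations
-- ===== SOURCE A (Python) =====
-- from collections import Counter
--
-- def summarize_violations(violations: list[str]) -> dict[str, int]:
--     """
--     Summarize a list of violation reason strings into counts by category.
--
--     Args:
--         violations: List of reason strings returned by validate_sample.
--
--     Returns:
--         Dict mapping error category -> count, sorted by frequency.
--     """
--     # Normalize: strip message index from per-message errors
--     normalized = []
--     for v in violations:
--         if v.startswith("message_") and "_not_a_dict" in v:
--             normalized.append("message_not_a_dict")
--         elif v.startswith("message_") and "_missing_role" in v: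
--             normalized.append("message_missing_role")
--         elif v.startswith("message_") and "_missing_content" in v:
--             normalized.append("message_missing_content")
--         elif v.startswith("message_") and "_role_not_string" in v:
--             normalized.append("message_role_not_string")
--         elif v.startswith("message_") and "_content_not_string" in v:
--             normalized.append("message_content_not_string")
--         elif v.startswith("message_") and "_invalid_role" in v:
--             normalized.append("message_invalid_role")
--         else:
--             normalized.append(v)
--
--     counts = Counter(normalized)
--     return dict(sorted(counts.items(), key=lambda x: -x[1]))
-- ===== SOURCE B (Python) =====
-- def summarize_violations(violations: list[str]) -> dict[str, int]:
--     # One fused pass: normalize each string and count it immediately (no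
--     # intermediate list, no Counter), then emit the result by counting sort:
--     # bucket the categories by their count and walk the counts from the
--     # highest possible (len(violations)) down to 1.
--     counts = {}
--     for v in violations:
--         if v.startswith("message_"):
--             for sub in ("_not_a_dict", "_missing_role", "_missing_content",
--                         "_role_not_string", "_content_not_string", "_invalid_role"):
--                 if sub in v:
--                     v = "message" + sub
--                     break
--         counts[v] = counts.get(v, 0) + 1
--     buckets = {}
--     for k, c in counts.items():
--         buckets.setdefault(c, []).append(k)
--     out = {}
--     for c in range(len(violations), 0, -1):
--         for k in buckets.get(c, []):
--             out[k] = c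
--     return out
-- ===== Notes on version B (the rewrite author's own statement) =====
-- stated objective: alternative
-- what changed: A builds a normalized list, runs Counter on it, and comparison-sorts the items by negated count; B fuses normalization and counting into one dict-building pass (no intermediate list, no Counter) and replaces the comparison sort by a counting sort: categories are bucketed by their count and emitted for count = len(violations) down to 1, which preserves A's stable tie order.
import Mathlib
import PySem

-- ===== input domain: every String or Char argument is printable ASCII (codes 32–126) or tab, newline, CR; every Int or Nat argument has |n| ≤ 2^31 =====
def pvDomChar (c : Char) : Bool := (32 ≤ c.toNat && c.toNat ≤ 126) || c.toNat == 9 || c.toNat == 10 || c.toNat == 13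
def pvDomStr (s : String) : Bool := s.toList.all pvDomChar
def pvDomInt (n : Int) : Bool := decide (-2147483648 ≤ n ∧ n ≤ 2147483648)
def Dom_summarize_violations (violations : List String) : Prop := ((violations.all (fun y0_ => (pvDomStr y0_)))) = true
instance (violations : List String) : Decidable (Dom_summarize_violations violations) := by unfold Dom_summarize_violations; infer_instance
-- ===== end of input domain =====

-- B fuses normalization and counting into one pass (no intermediate list, no Counter) and
-- replaces the comparison sort by a counting sort: categories are bucketed by their count and
-- emitted for count = len(violations) down to 1; objective: alternative. Python's dict(sorted(...))
-- over unique keys is the association list itself, so both ports return the item list directly.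

-- ===== PORT A =====
def summarize_violations (violations : List String) : List (String × Int) :=
  let normalized := violations.foldl (fun acc v =>
    if PySem.Str.startswith v "message_" && PySem.Str.isIn "_not_a_dict" v then
      acc ++ ["message_not_a_dict"]
    else if PySem.Str.startswith v "message_" && PySem.Str.isIn "_missing_role" v then
      acc ++ ["message_missing_role"]
    else if PySem.Str.startswith v "message_" && PySem.Str.isIn "_missing_content" v then
      acc ++ ["message_missing_content"]
    else if PySem.Str.startswith v "message_" && PySem.Str.isIn "_role_not_string" v then
      acc ++ ["message_role_not_string"]
    else if PySem.Str.startswith v "message_" && PySem.Str.isIn "_content_not_string" v then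
      acc ++ ["message_content_not_string"]
    else if PySem.Str.startswith v "message_" && PySem.Str.isIn "_invalid_role" v then
      acc ++ ["message_invalid_role"]
    else
      acc ++ [v]) []
  let counts := PySem.Dict.counter normalized
  PySem.List.sorted counts.items (fun x => -x.2) false

-- ===== PORT B =====
def pvTable : List (String × String) :=
  [("_not_a_dict", "message_not_a_dict"),
   ("_missing_role", "message_missing_role"),
   ("_missing_content", "message_missing_content"),
   ("_role_not_string", "message_role_not_string"),
   ("_content_not_string", "message_content_not_string"),
   ("_invalid_role", "message_invalid_role")]

-- the inner 'for sub, cat in …: if sub in v: v = cat; break' loop of Source B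
def pvNorm : List (String × String) → String → String
  | [], v => v
  | (sub, cat) :: rest, v =>
      if PySem.Str.isIn sub v then cat else pvNorm rest v

def summarize_violations_alt (violations : List String) : List (String × Int) :=
  -- one fused pass: normalize v, then counts[v] = counts.get(v, 0) + 1
  let counts := violations.foldl (fun d v =>
    let k := if PySem.Str.startswith v "message_" then pvNorm pvTable v else v
    d.insert k (d.getD k 0 + 1)) PySem.Dict.empty
  -- buckets.setdefault(c, []).append(k)
  let buckets := counts.items.foldl (fun d p => d.modify p.2 [] (fun l => l ++ [p.1])) PySem.Dict.empty
  -- for c in range(len(violations), 0, -1): for k in buckets.get(c, []): out[k] = c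
  let out := (PySem.List.pyRange (violations.length : Int) 0 (-1)).foldl (fun d c =>
    (buckets.getD c []).foldl (fun d k => d.insert k c) d) PySem.Dict.empty
  out.items

-- ===== PRECONDITION & SPEC =====
def Spec_summarize_violations (violations : List String) (out : List (String × Int)) : Prop := out = summarize_violations_alt violations
instance (violations : List String) (out : List (String × Int)) : Decidable (Spec_summarize_violations violations out) := by unfold Spec_summarize_violations; infer_instance

-- ===== CLAIM (what is proved, stated in full; the proofs are below) =====
def Claim_equal_summarize_violations : Prop := ∀ (violations : List String), Dom_summarize_violations violations → Spec_summarize_violations violations (summarize_violations violations)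

-- ===== LEMMAS AND PROOFS =====

-- B's normalization of one element, as a function
def pvCat (v : String) : String :=
  if PySem.Str.startswith v "message_" then pvNorm pvTable v else v

-- A's loop body appends B's categorization of the element
theorem step_eq (acc : List String) (v : String) :
    (if PySem.Str.startswith v "message_" && PySem.Str.isIn "_not_a_dict" v then acc ++ ["message_not_a_dict"]
     else if PySem.Str.startswith v "message_" && PySem.Str.isIn "_missing_role" v then acc ++ ["message_missing_role"]
     else if PySem.Str.startswith v "message_" && PySem.Str.isIn "_missing_content" v then acc ++ ["message_missing_content"]
     else if PySem.Str.startswith v "message_" && PySem.Str.isIn "_role_not_string" v then acc ++ ["message_role_not_string"]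
     else if PySem.Str.startswith v "message_" && PySem.Str.isIn "_content_not_string" v then acc ++ ["message_content_not_string"]
     else if PySem.Str.startswith v "message_" && PySem.Str.isIn "_invalid_role" v then acc ++ ["message_invalid_role"]
     else acc ++ [v]) = acc ++ [pvCat v] := by
  unfold pvCat pvTable
  by_cases h : PySem.Str.startswith v "message_" = true
  · simp only [h, Bool.true_and, if_true, pvNorm]
    split_ifs <;> rfl
  · have h' : PySem.Str.startswith v "message_" = false := by
      revert h; cases PySem.Str.startswith v "message_" <;> simp
    simp only [h', Bool.false_and, Bool.false_eq_true, if_false]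

-- A's append loop builds the map of B's categorization
theorem normalized_eq (xs : List String) (acc : List String) :
    xs.foldl (fun acc v =>
      if PySem.Str.startswith v "message_" && PySem.Str.isIn "_not_a_dict" v then acc ++ ["message_not_a_dict"]
      else if PySem.Str.startswith v "message_" && PySem.Str.isIn "_missing_role" v then acc ++ ["message_missing_role"]
      else if PySem.Str.startswith v "message_" && PySem.Str.isIn "_missing_content" v then acc ++ ["message_missing_content"]
      else if PySem.Str.startswith v "message_" && PySem.Str.isIn "_role_not_string" v then acc ++ ["message_role_not_string"]
      else if PySem.Str.startswith v "message_" && PySem.Str.isIn "_content_not_string" v then acc ++ ["message_content_not_string"]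
      else if PySem.Str.startswith v "message_" && PySem.Str.isIn "_invalid_role" v then acc ++ ["message_invalid_role"]
      else acc ++ [v]) acc = acc ++ xs.map pvCat := by
  induction xs generalizing acc with
  | nil => simp
  | cons x t ih => rw [List.foldl_cons, step_eq, ih]; simp

-- B's fused counting loop is Counter of the categorized list
theorem counts_eq (violations : List String) :
    violations.foldl (fun d v =>
      let k := if PySem.Str.startswith v "message_" then pvNorm pvTable v else v
      d.insert k (d.getD k 0 + 1)) PySem.Dict.empty
    = PySem.Dict.counter (violations.map pvCat) := by
  rw [← PySem.Dict.foldl_insert_getD_add_one_eq_counter, List.foldl_map]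
  rfl

-- skip a prefix the inserted element does not go before
theorem insertBy_append_left {α : Type} (p : α → α → Bool) (x : α) (l1 l2 : List α)
    (h : ∀ y ∈ l1, p x y = false) :
    PySem.List.insertBy p x (l1 ++ l2) = l1 ++ PySem.List.insertBy p x l2 := by
  induction l1 with
  | nil => simp
  | cons y t ih =>
      simp only [List.cons_append, PySem.List.insertBy, h y (by simp)]
      simp only [Bool.false_eq_true, if_false, List.cons.injEq, true_and]
      exact ih (fun z hz => h z (by simp [hz]))

-- insert at the front when the element goes before everything
theorem insertBy_of_forall_before {α : Type} (p : α → α → Bool) (x : α) (ys : List α)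
    (h : ∀ y ∈ ys, p x y = true) :
    PySem.List.insertBy p x ys = x :: ys := by
  cases ys with
  | nil => rfl
  | cons y t => simp [PySem.List.insertBy, h y (by simp)]

-- inserting into a bucket flattening appends to the bucket of the element's count
theorem insertBy_flatMap (cs : List Int) (xs : List (String × Int)) (x : String × Int)
    (hdesc : cs.Pairwise (fun a b => b < a)) (hx : x.2 ∈ cs) :
    PySem.List.insertBy (fun a b => decide (-a.2 < -b.2)) x
      (cs.flatMap (fun c => xs.filter (fun p => p.2 == c)))
    = cs.flatMap (fun c => (xs ++ [x]).filter (fun p => p.2 == c)) := by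
  induction cs with
  | nil => cases hx
  | cons c cs' ih =>
      rw [List.pairwise_cons] at hdesc
      obtain ⟨hlt, hdesc'⟩ := hdesc
      have hfilt : ∀ c' : Int, (xs ++ [x]).filter (fun p => p.2 == c')
          = xs.filter (fun p => p.2 == c') ++ if x.2 == c' then [x] else [] := by
        intro c'; rw [List.filter_append]
        congr 1
        by_cases h : x.2 = c'
        · have hb : (x.2 == c') = true := by simp [h]
          simp [List.filter, hb]
        · have hb : (x.2 == c') = false := by simp [h]
          simp [List.filter, hb]
      by_cases hc : x.2 = c
      · -- x belongs to the head bucket: skip it, then insert before the rest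
        have h1 : ∀ y ∈ xs.filter (fun p => p.2 == c), (decide (-x.2 < -y.2)) = false := by
          intro y hy
          have : y.2 = c := by simpa using (List.mem_filter.mp hy).2
          simp [this, hc]
        have h2 : ∀ y ∈ cs'.flatMap (fun c' => xs.filter (fun p => p.2 == c')),
            (decide (-x.2 < -y.2)) = true := by
          intro y hy
          obtain ⟨c', hc', hyf⟩ := List.mem_flatMap.mp hy
          have : y.2 = c' := by simpa using (List.mem_filter.mp hyf).2
          have : y.2 < c := by rw [this]; exact hlt c' hc'
          simp only [decide_eq_true_eq]; omega
        rw [List.flatMap_cons, insertBy_append_left _ _ _ _ h1,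
          insertBy_of_forall_before _ _ _ h2, List.flatMap_cons, hfilt c]
        have hrest : cs'.flatMap (fun c' => (xs ++ [x]).filter (fun p => p.2 == c'))
            = cs'.flatMap (fun c' => xs.filter (fun p => p.2 == c')) := by
          apply List.flatMap_congr
          intro c' hc'
          rw [hfilt c']
          have : (x.2 == c') = false := by
            have := hlt c' hc'; simp only [beq_eq_false_iff_ne, ne_eq]; omega
          rw [this]; simp
        rw [hrest]
        have : (x.2 == c) = true := by simp [hc]
        rw [this]
        simp
      · -- x belongs to a later bucket: skip the head bucket, recurse
        have hx' : x.2 ∈ cs' := by cases hx with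
          | head => exact absurd rfl hc
          | tail _ h => exact h
        have hxlt : x.2 < c := hlt _ hx'
        have h1 : ∀ y ∈ xs.filter (fun p => p.2 == c), (decide (-x.2 < -y.2)) = false := by
          intro y hy
          have : y.2 = c := by simpa using (List.mem_filter.mp hy).2
          simp only [decide_eq_false_iff_not]; omega
        rw [List.flatMap_cons, insertBy_append_left _ _ _ _ h1, ih hdesc' hx',
          List.flatMap_cons, hfilt c]
        have : (x.2 == c) = false := by simp [hc]
        rw [this]
        simp

-- the stable ascending sort by -count is the descending bucket flattening
theorem sorted_eq_flatMap (cs : List Int) (xs : List (String × Int))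
    (hdesc : cs.Pairwise (fun a b => b < a))
    (hmem : ∀ p ∈ xs, p.2 ∈ cs) :
    PySem.List.sorted xs (fun p => -p.2) false
    = cs.flatMap (fun c => xs.filter (fun p => p.2 == c)) := by
  induction xs using List.reverseRecOn with
  | nil => simp [PySem.List.sorted_eq_foldl_insertBy]
  | append_singleton xs x ih =>
      rw [PySem.List.sorted_eq_foldl_insertBy, List.foldl_append, List.foldl_cons, List.foldl_nil,
        ← PySem.List.sorted_eq_foldl_insertBy, ih (fun p hp => hmem p (by simp [hp]))]
      exact insertBy_flatMap cs xs x hdesc (hmem x (by simp))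

-- range(n, 0, -1)
theorem pyRange_down (n : Nat) :
    PySem.List.pyRange (n : Int) 0 (-1) = (List.range n).map (fun k : Nat => (n : Int) - (k : Int)) := by
  unfold PySem.List.pyRange
  norm_num
  have h : (if 0 < n then n else 0) = n := by split <;> omega
  rw [h]
  simp [sub_eq_add_neg]

-- membership in range(n, 0, -1)
theorem mem_pyRange_down (n : Nat) (c : Int) (h1 : 1 ≤ c) (h2 : c ≤ (n : Int)) :
    c ∈ PySem.List.pyRange (n : Int) 0 (-1) := by
  rw [pyRange_down]
  exact List.mem_map.mpr ⟨((n : Int) - c).toNat, List.mem_range.mpr (by omega), by omega⟩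

-- range(n, 0, -1) is strictly descending
theorem pyRange_down_desc (n : Nat) :
    (PySem.List.pyRange (n : Int) 0 (-1)).Pairwise (fun a b => b < a) := by
  rw [pyRange_down]
  refine List.pairwise_map.mpr (List.pairwise_lt_range.imp ?_)
  intro a b h
  omega

-- ===== VERDICT (by name: the statement is the Claim_ definition above) =====
theorem summarize_violations_spec : Claim_equal_summarize_violations := by
  intro violations _
  unfold Spec_summarize_violations summarize_violations summarize_violations_alt
  dsimp only
  rw [normalized_eq, counts_eq, List.nil_append]
  set xs := violations.map pvCat with hxs
  set items := (PySem.Dict.counter xs).items with hitems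
  set n := violations.length with hn
  set cs := PySem.List.pyRange (n : Int) 0 (-1) with hcs
  have hlen : xs.length = n := by rw [hxs, List.length_map]
  -- every item's count lies in range(n, 0, -1)
  have hmem : ∀ p ∈ items, p.2 ∈ cs := by
    intro p hp
    rw [hitems, PySem.Dict.items_counter] at hp
    obtain ⟨k, hk, rfl⟩ := List.mem_map.mp hp
    have hkx : k ∈ xs := (PySem.Set.mem_ofList xs k).mp hk
    have h1 : 0 < xs.count k := List.count_pos_iff.mpr hkx
    have h2 : xs.count k ≤ n := by rw [← hlen]; exact List.count_le_length
    show (List.count k xs : Int) ∈ cs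
    exact mem_pyRange_down n _ (by exact_mod_cast h1) (by exact_mod_cast h2)
  -- A's sorted output is the bucket flattening
  have hA : PySem.List.sorted items (fun x => -x.2) false
      = cs.flatMap (fun c => items.filter (fun p => p.2 == c)) :=
    sorted_eq_flatMap cs items (pyRange_down_desc n) hmem
  rw [hA]
  -- the flattening's keys are the dict's keys, hence nodup
  have hperm : (cs.flatMap (fun c => items.filter (fun p => p.2 == c))).Perm items := by
    rw [← hA]; exact PySem.List.sorted_perm items (fun x => -x.2) false
  have hnodup : ((cs.flatMap (fun c => items.filter (fun p => p.2 == c))).map Prod.fst).Nodup := by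
    refine ((hperm.map Prod.fst).nodup_iff).mpr ?_
    have := PySem.Dict.nodup_keys_counter xs
    simpa [PySem.Dict.keys, hitems] using this
  -- each bucket list of B is the filtered keys
  have hbuck : ∀ c : Int,
      (items.foldl (fun d p => d.modify p.2 [] (fun l => l ++ [p.1]))
        PySem.Dict.empty).getD c []
      = (items.filter (fun p => p.2 == c)).map Prod.fst := by
    intro c
    have hswap : items.foldl (fun d p => d.modify p.2 [] (fun l => l ++ [p.1]))
        (PySem.Dict.empty : PySem.Dict Int (List String))
        = (items.map (fun p => (p.2, p.1))).foldl
            (fun d p => d.modify p.1 [] (fun l => l ++ [p.2])) PySem.Dict.empty := by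
      rw [List.foldl_map]
    rw [hswap, PySem.Dict.getD_foldl_modify_append, PySem.Dict.getD_empty, List.nil_append,
      List.filter_map]
    rw [List.map_map]
    rfl
  -- B's double loop is one insert loop over the flattening
  have hB : (cs.foldl (fun d c =>
      ((items.foldl (fun d p => d.modify p.2 [] (fun l => l ++ [p.1]))
        PySem.Dict.empty).getD c []).foldl (fun d k => d.insert k c) d)
      (PySem.Dict.empty : PySem.Dict String Int))
      = (cs.flatMap (fun c => items.filter (fun p => p.2 == c))).foldl
          (fun d p => d.insert p.1 p.2) PySem.Dict.empty := by
    rw [List.foldl_flatMap]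
    apply PySem.List.foldl_congr_mem
    intro d c hc
    rw [hbuck c, List.foldl_map]
    apply PySem.List.foldl_congr_mem
    intro d' p hp
    have : p.2 = c := by simpa using (List.mem_filter.mp hp).2
    rw [this]
  rw [hB]
  rw [PySem.Dict.items_foldl_insert_fresh _ Prod.fst Prod.snd _
    (fun a _ => PySem.Dict.contains_empty a.1) hnodup]
  simp [show (PySem.Dict.empty : PySem.Dict String Int).items = [] from rfl]
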